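-- pv_equiv track=rewrite | github.com/esemsc-dda24/PTL-PINNs | ptlpinns/models/transfer_kpp.py | force_func_perturbation
-- ===== SOURCE A (Python) =====
-- def force_func_perturbation(n):
--     solution_index = []
--     for a in range(n+1):
--         for b in range(a+1):
--                 if ((a+b)==n):
--                     if (a==b):
--                         solution_index.append([a, b, 1])
--                     else:
--                         solution_index.append([a, b, 2])
--     return solution_index
-- ===== SOURCE B (Python) =====
-- def force_func_perturbation(n):
--     # closed-form: for each a from ceil(n/2) to n, the unique b is n-a; O(n) instead of O(n^2)
--     return [[a, n - a, 1 if 2 * a == n else 2] for a in range(-(-n // 2), n + 1)]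
-- ===== Notes on version B (the rewrite author's own statement) =====
-- stated objective: faster
-- what changed: Replaces the quadratic double loop over all (a,b) pairs by a single pass over a in [ceil(n/2), n] computing b = n-a directly.
import Mathlib
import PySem

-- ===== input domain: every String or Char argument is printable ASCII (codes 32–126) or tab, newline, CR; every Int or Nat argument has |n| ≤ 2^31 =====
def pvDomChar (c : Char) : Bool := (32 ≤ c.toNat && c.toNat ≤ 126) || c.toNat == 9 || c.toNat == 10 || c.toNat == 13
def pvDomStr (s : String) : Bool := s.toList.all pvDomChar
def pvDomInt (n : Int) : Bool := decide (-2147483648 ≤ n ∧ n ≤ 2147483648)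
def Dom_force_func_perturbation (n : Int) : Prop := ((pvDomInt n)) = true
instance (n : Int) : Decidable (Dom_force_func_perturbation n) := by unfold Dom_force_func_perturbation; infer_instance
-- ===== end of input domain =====

-- B replaces A's quadratic double loop by one pass over a in [ceil(n/2), n] with b = n-a (objective: faster).

-- ===== PORT A =====
def force_func_perturbation (n : Int) : List (List Int) :=
  (PySem.List.pyRange 0 (n + 1) 1).foldl (fun acc a =>
    (PySem.List.pyRange 0 (a + 1) 1).foldl (fun acc2 b =>
      if a + b = n then
        if a = b then acc2 ++ [[a, b, 1]] else acc2 ++ [[a, b, 2]]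
      else acc2) acc) []

-- ===== PORT B =====
def force_func_perturbation_alt (n : Int) : List (List Int) :=
  (PySem.List.pyRange (-(PySem.Int.floordiv (-n) 2)) (n + 1) 1).map
    (fun a => [a, n - a, if 2 * a = n then 1 else 2])

-- ===== PRECONDITION & SPEC =====
def Spec_force_func_perturbation (n : Int) (out : List (List Int)) : Prop := out = force_func_perturbation_alt n
instance (n : Int) (out : List (List Int)) : Decidable (Spec_force_func_perturbation n out) := by unfold Spec_force_func_perturbation; infer_instance

-- ===== CLAIM (what is proved, stated in full; the proofs are below) =====
def Claim_equal_force_func_perturbation : Prop := ∀ (n : Int), Dom_force_func_perturbation n → Spec_force_func_perturbation n (force_func_perturbation n)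

-- ===== LEMMAS AND PROOFS =====

-- the contribution of one outer iteration of A: the inner loop over b appends at most one row
def ffpRow (n a : Int) : List (List Int) :=
  if 0 ≤ n - a ∧ n - a ≤ a then [[a, n - a, if 2 * a = n then 1 else 2]] else []

theorem ffp_inner (n a : Int) : ∀ (lo hi : Int) (acc : List (List Int)),
    (PySem.List.pyRange lo hi 1).foldl (fun acc2 b =>
      if a + b = n then
        if a = b then acc2 ++ [[a, b, 1]] else acc2 ++ [[a, b, 2]]
      else acc2) acc
    = acc ++ (if lo ≤ n - a ∧ n - a < hi then [[a, n - a, if 2 * a = n then 1 else 2]] else []) := by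
  intro lo hi
  induction hge : (hi - lo).toNat generalizing lo with
  | zero =>
    intro acc
    rw [PySem.List.pyRange_one_eq_nil (by omega)]
    simp only [List.foldl_nil]
    rw [if_neg (by omega)]
    simp
  | succ k ih =>
    intro acc
    rw [PySem.List.pyRange_one_cons (by omega)]
    simp only [List.foldl_cons]
    rw [ih (lo + 1) (by omega)]
    by_cases hb : a + lo = n
    · rw [if_pos hb, if_neg (show ¬(lo + 1 ≤ n - a ∧ n - a < hi) by omega),
        if_pos (show lo ≤ n - a ∧ n - a < hi by omega)]
      by_cases he : a = lo
      · rw [if_pos he, if_pos (show 2 * a = n by omega)]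
        simp [show n - a = lo by omega]
      · rw [if_neg he, if_neg (show ¬(2 * a = n) by omega)]
        simp [show n - a = lo by omega]
    · rw [if_neg hb]
      by_cases hc : lo + 1 ≤ n - a ∧ n - a < hi
      · rw [if_pos hc, if_pos (show lo ≤ n - a ∧ n - a < hi by omega)]
      · rw [if_neg hc, if_neg (show ¬(lo ≤ n - a ∧ n - a < hi) by omega)]

theorem ffp_flatMap (n : Int) :
    force_func_perturbation n = (PySem.List.pyRange 0 (n + 1) 1).flatMap (ffpRow n) := by
  unfold force_func_perturbation
  have hstep : (fun (acc : List (List Int)) (a : Int) =>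
      (PySem.List.pyRange 0 (a + 1) 1).foldl (fun acc2 b =>
        if a + b = n then
          if a = b then acc2 ++ [[a, b, 1]] else acc2 ++ [[a, b, 2]]
        else acc2) acc)
      = fun acc a => acc ++ ffpRow n a := by
    funext acc a
    rw [ffp_inner n a 0 (a + 1) acc]
    unfold ffpRow
    by_cases h : 0 ≤ n - a ∧ n - a ≤ a
    · rw [if_pos (by omega), if_pos h]
    · rw [if_neg (by omega), if_neg h]
  rw [hstep, PySem.List.foldl_append_eq_flatMap]
  simp

theorem ffp_flatMap_nil (n : Int) (xs : List Int) (h : ∀ a ∈ xs, ¬ (0 ≤ n - a ∧ n - a ≤ a)) :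
    xs.flatMap (ffpRow n) = [] := by
  refine List.flatMap_eq_nil_iff.mpr ?_
  intro a ha
  unfold ffpRow
  rw [if_neg (h a ha)]

theorem ffp_flatMap_map (n : Int) (xs : List Int) (h : ∀ a ∈ xs, 0 ≤ n - a ∧ n - a ≤ a) :
    xs.flatMap (ffpRow n) = xs.map (fun a => [a, n - a, if 2 * a = n then 1 else 2]) := by
  induction xs with
  | nil => simp
  | cons x xs ih =>
    simp only [List.flatMap_cons, List.map_cons]
    rw [ih (fun a ha => h a (List.mem_cons_of_mem x ha))]
    unfold ffpRow
    rw [if_pos (h x List.mem_cons_self)]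
    simp

-- ===== VERDICT (by name: the statement is the Claim_ definition above) =====
theorem force_func_perturbation_spec : Claim_equal_force_func_perturbation := by
  intro n _
  unfold Spec_force_func_perturbation force_func_perturbation_alt
  rw [ffp_flatMap]
  have hc := (PySem.Int.neg_floordiv_neg_eq_iff_of_pos (a := n) (b := 2)
      (q := -(PySem.Int.floordiv (-n) 2)) (by omega)).mp rfl
  set c : Int := -(PySem.Int.floordiv (-n) 2) with hcdef
  by_cases hn : 0 ≤ n
  · have h0c : 0 ≤ c := by omega
    have hcn : c ≤ n + 1 := by omega
    rw [PySem.List.pyRange_one_append 0 c (n + 1) h0c hcn, List.flatMap_append]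
    rw [ffp_flatMap_nil n _ (by
      intro a ha
      rw [PySem.List.mem_pyRange_one] at ha
      omega)]
    rw [ffp_flatMap_map n _ (by
      intro a ha
      rw [PySem.List.mem_pyRange_one] at ha
      omega)]
    simp
  · rw [PySem.List.pyRange_one_eq_nil (by omega), PySem.List.pyRange_one_eq_nil (by omega)]
    simp
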